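-- pv_equiv track=rewrite | github.com/Aurelo2001/OpenSourceRIS | Software/RIS Software/lib/RIScontroller.py | mask_print_bool
-- ===== SOURCE A (Python) =====
-- def mask_print_bool(pattern):
--     """
--     Gibt das aktuelle Aktivitätsmuster des RIS als Textgrafik aus.
--     ░░░ = inaktiv, ███ = aktiv
--     """
--     # Schritt 1: Hex-String in Binär-String konvertieren (256 Bits, also 64 * 4)
--     binary_string = bin(int(pattern, 16))[2:].zfill(256)
--
--     # Schritt 2: In eine 16x16 Liste umwandeln
--     bit_matrix = [
--         [int(bit) for bit in binary_string[i * 16:(i + 1) * 16]]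
--         for i in range(16)
--     ]
--     # for row in self.element_mask:
--     line = ""
--     for row in bit_matrix:
--         for active in row:
--             line += "███ " if active else "░░░ "
--         line += "\n"
--     return line
-- ===== SOURCE B (Python) =====
-- def mask_print_bool(pattern):
--     """
--     Gibt das aktuelle Aktivitätsmuster des RIS als Textgrafik aus.
--     ░░░ = inaktiv, ███ = aktiv
--     """
--     n = int(pattern, 16)
--     # the grid shows the 256 leading bits of the (at least 256-bit wide) binary expansion
--     w = max(n.bit_length(), 256)
--     return "".join(
--         "".join("███ " if (n >> (w - 1 - 16 * r - c)) & 1 else "░░░ " for c in range(16)) + "\n"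
--         for r in range(16)
--     )
-- ===== Notes on version B (the rewrite author's own statement) =====
-- stated objective: alternative
-- what changed: B never materialises A's zero-padded binary string or the 16x16 bit matrix: it extracts each cell's bit directly from the parsed integer with a shift-and-mask test (n >> (w-1-16r-c)) & 1 against the 256 leading bit positions and joins the rendered rows.
import Mathlib
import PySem

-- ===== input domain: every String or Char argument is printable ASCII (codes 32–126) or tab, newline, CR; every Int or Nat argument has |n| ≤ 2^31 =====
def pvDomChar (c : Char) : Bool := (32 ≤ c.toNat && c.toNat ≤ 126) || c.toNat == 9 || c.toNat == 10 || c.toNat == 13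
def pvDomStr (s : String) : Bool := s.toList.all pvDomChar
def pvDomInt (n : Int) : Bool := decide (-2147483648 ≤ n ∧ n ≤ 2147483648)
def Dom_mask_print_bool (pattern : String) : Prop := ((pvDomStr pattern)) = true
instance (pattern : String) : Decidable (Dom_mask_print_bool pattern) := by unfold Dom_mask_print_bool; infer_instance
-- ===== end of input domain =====

-- B reads each cell's bit directly off the parsed integer with shift-and-mask
-- arithmetic ((n >> (255-16r-c)) & 1), never building A's 256-character binary
-- string or its 16x16 bit matrix (objective: alternative; same cost).


-- ===== PORT A =====
-- binary digits of n (most significant first), empty for n = 0 (hand port of bin's digit part, exact)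
def pvBinGo (n : Nat) : List Char :=
  if n = 0 then [] else pvBinGo (n / 2) ++ [if n % 2 = 1 then '1' else '0']
  decreasing_by exact Nat.div_lt_self (by omega) (by omega)

-- bin(n)[2:] (hand port, exact also for n < 0, where the [2:] slice leaves the base marker in front)
def pvBin (n : Int) : List Char :=
  if n < 0 then 'b' :: (if (-n).toNat = 0 then ['0'] else pvBinGo (-n).toNat)
  else if n.toNat = 0 then ['0'] else pvBinGo n.toNat

def pvBlk : List Char := "███ ".toList
def pvShd : List Char := "░░░ ".toList

-- int(bit); the .getD 0 is unreachable under Pre_ (every bit char is '0'/'1' there)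
def pvIntBit (c : Char) : Int := (PySem.Int.ofChars? [c]).getD 0

def mask_print_bool (pattern : String) : String :=
  match PySem.Int.ofStrBase? pattern 16 with
  | none => ""        -- int(pattern, 16) raises ValueError: outside Pre_
  | some n =>
    -- for n < 0 Python raises later (int() of the base-marker letter in the comprehension): outside Pre_
    let binary_string : List Char := PySem.Chars.zfill (pvBin n) 256
    let bit_matrix : List (List Int) :=
      (PySem.List.pyRange 0 16 1).map (fun i =>
        (PySem.List.slice binary_string (some (i * 16)) (some ((i + 1) * 16))).map pvIntBit)
    let line : List Char :=
      bit_matrix.foldl (fun line row =>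
        (row.foldl (fun line active => line ++ (if active ≠ 0 then pvBlk else pvShd)) line) ++ ['\n']) []
    String.mk line

-- ===== PORT B =====
-- Python's 'n >> k' is Lean's '>>>', 'x & 1' is PySem.Int.band x 1 and n.bit_length() is
-- PySem.Int.bitLength (all Python-exact); the shift amount w-1-16r-c is ≥ 0 because w ≥ 256,
-- so .toNat is exact there; truthiness of an int is ≠ 0.
def mask_print_bool_alt (pattern : String) : String :=
  match PySem.Int.ofStrBase? pattern 16 with
  | none => ""        -- int(pattern, 16) raises ValueError: outside Pre_
  | some n =>
    let w : Nat := max (PySem.Int.bitLength n) 256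
    String.mk (PySem.Chars.join []
      ((PySem.List.pyRange 0 16 1).map (fun r =>
        PySem.Chars.join [] ((PySem.List.pyRange 0 16 1).map (fun c =>
          if PySem.Int.band (n >>> ((w : Int) - 1 - 16 * r - c).toNat) 1 ≠ 0 then pvBlk else pvShd))
        ++ ['\n'])))

-- ===== PRECONDITION & SPEC =====
-- Pre_ excludes exactly the inputs where A raises ValueError: pattern not a valid base-16
-- int literal, or a negative one (there bin(n)[2:] keeps the base-marker letter in front,
-- and int() of that letter in the comprehension raises).
def Pre_mask_print_bool (pattern : String) : Prop :=
  (PySem.Int.ofStrBase? pattern 16).isSome = true ∧ 0 ≤ (PySem.Int.ofStrBase? pattern 16).getD 0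
instance (pattern : String) : Decidable (Pre_mask_print_bool pattern) := by unfold Pre_mask_print_bool; infer_instance
def pvWitness_mask_print_bool : String := "ff"

def Spec_mask_print_bool (pattern : String) (out : String) : Prop := out = mask_print_bool_alt pattern
instance (pattern : String) (out : String) : Decidable (Spec_mask_print_bool pattern out) := by unfold Spec_mask_print_bool; infer_instance

-- ===== CLAIM (what is proved, stated in full; the proofs are below) =====
def Claim_equal_mask_print_bool : Prop := ∀ (pattern : String), Dom_mask_print_bool pattern → Pre_mask_print_bool pattern → Spec_mask_print_bool pattern (mask_print_bool pattern)

-- ===== LEMMAS AND PROOFS =====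

-- the bit value both programs agree on for cell idx of a w-bit-wide field, and its rendering
def pvBitChar (m w idx : Nat) : Char := if m / 2 ^ (w - 1 - idx) % 2 = 1 then '1' else '0'
def pvCell (m w idx : Nat) : List Char := if m / 2 ^ (w - 1 - idx) % 2 = 1 then pvBlk else pvShd

-- the zero-padded k-digit binary representation, written as A computes it (LSB peeled last)
def pvPad (k : Nat) (m : Nat) : List Char :=
  match k with
  | 0 => []
  | k + 1 => pvPad k (m / 2) ++ [if m % 2 = 1 then '1' else '0']

lemma pvBinGo_mem {n : Nat} {c : Char} (h : c ∈ pvBinGo n) : c = '0' ∨ c = '1' := by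
  induction n using Nat.strong_induction_on with
  | _ n ih =>
    rw [pvBinGo] at h
    split at h
    · simp at h
    · rcases List.mem_append.1 h with h | h
      · exact ih _ (Nat.div_lt_self (by omega) (by omega)) h
      · simp at h; subst h; split <;> simp

lemma pvBinGo_lt (m : Nat) : m < 2 ^ (pvBinGo m).length := by
  induction m using Nat.strong_induction_on with
  | _ m ih =>
    rw [pvBinGo]
    split
    · simp_all
    · have h2 := ih (m / 2) (Nat.div_lt_self (by omega) (by omega))
      rw [List.length_append, List.length_singleton, pow_succ]
      omega

lemma pvBitLen (m : Nat) : PySem.Int.bitLength (m : Int) = (pvBinGo m).length := by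
  induction m using Nat.strong_induction_on with
  | _ m ih =>
    by_cases h : m = 0
    · subst h
      rw [pvBinGo, if_pos rfl]
      simp [PySem.Int.bitLength_zero]
    · rw [PySem.Int.bitLength_natCast (m := m) (by omega), pvBinGo, if_neg h,
        ih (m / 2) (Nat.div_lt_self (by omega) (by omega))]
      simp

lemma pvPad_zero (k : Nat) : pvPad k 0 = List.replicate k '0' := by
  induction k with
  | zero => rfl
  | succ k ih => rw [pvPad, ih]; simp [List.replicate_succ']

-- padding A's hand-rolled binary digits to k places gives pvPad
lemma pvPad_eq {k m : Nat} (h : m < 2 ^ k) :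
    List.replicate (k - (pvBinGo m).length) '0' ++ pvBinGo m = pvPad k m := by
  induction k generalizing m with
  | zero => interval_cases m; rw [pvBinGo]; simp [pvPad]
  | succ k ih =>
    by_cases hm : m = 0
    · subst hm; rw [pvBinGo, if_pos rfl, pvPad_zero]; simp
    · have hdiv : m / 2 < 2 ^ k := by rw [pow_succ] at h; omega
      have hlen2 : (pvBinGo m).length = (pvBinGo (m / 2)).length + 1 := by
        rw [pvBinGo, if_neg hm]; simp
      have hb : pvBinGo m = pvBinGo (m / 2) ++ [if m % 2 = 1 then '1' else '0'] := by
        conv_lhs => rw [pvBinGo]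
        rw [if_neg hm]
      have he : k + 1 - ((pvBinGo (m / 2)).length + 1) = k - (pvBinGo (m / 2)).length := by omega
      rw [pvPad, ← ih hdiv, hlen2, he, hb, ← List.append_assoc]

-- A's zfilled bin(m)[2:] is pvPad at width w = max(bit-digit-count, 256), for 0 ≤ m
lemma pvZfill_pad (m : Nat) :
    PySem.Chars.zfill (pvBin (m : Int)) 256 = pvPad (max (pvBinGo m).length 256) m := by
  have hbin : pvBin (m : Int) = if m = 0 then ['0'] else pvBinGo m := by
    rw [pvBin, if_neg (by omega)]; simp
  by_cases hm : m = 0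
  · subst hm
    have h0 : pvBinGo 0 = [] := by rw [pvBinGo]; simp
    rw [hbin, if_pos rfl, h0, PySem.Chars.zfill.eq_def]
    have hmax : max ([] : List Char).length 256 = 256 := by simp
    rw [hmax, pvPad_zero]
    split
    · rename_i hle; simp at hle
    · change (if ('0' = '+' ∨ '0' = '-') then '0' :: (List.replicate (((256 : Int)).toNat - List.length ['0']) '0' ++ [])
          else List.replicate (((256 : Int)).toNat - List.length ['0']) '0' ++ ['0']) = List.replicate 256 '0'
      rw [if_neg (by decide)]
      have h1 : ((256 : Int)).toNat - List.length ['0'] = 255 := by decide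
      rw [h1, ← List.replicate_succ']
  · obtain ⟨c, rest, hcr⟩ := List.exists_cons_of_ne_nil
      (show pvBinGo m ≠ [] from by rw [pvBinGo, if_neg hm]; simp)
    have hc : ¬ (c = '+' ∨ c = '-') := by
      rcases pvBinGo_mem (hcr ▸ List.mem_cons_self) with h' | h' <;> subst h' <;> decide
    have hlt := pvBinGo_lt m
    rw [hbin, if_neg hm, hcr, PySem.Chars.zfill.eq_def]
    split
    · rename_i hle
      have h256 : 256 ≤ (c :: rest).length := by exact_mod_cast hle
      rw [Nat.max_eq_left h256]
      have hp := pvPad_eq hlt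
      rw [Nat.sub_self, List.replicate, List.nil_append, hcr] at hp
      exact hp
    · rename_i hle
      have h256 : (c :: rest).length ≤ 256 := by omega
      have hlt256 : m < 2 ^ 256 :=
        lt_of_lt_of_le hlt (by rw [hcr]; exact Nat.pow_le_pow_right (by omega) h256)
      rw [Nat.max_eq_right h256]
      change (if (c = '+' ∨ c = '-') then c :: (List.replicate (((256 : Int)).toNat - (c :: rest).length) '0' ++ rest)
          else List.replicate (((256 : Int)).toNat - (c :: rest).length) '0' ++ c :: rest) = pvPad 256 m
      rw [if_neg hc, show ((256 : Int)).toNat = 256 from rfl, ← hcr]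
      exact pvPad_eq hlt256

lemma pvPad_map (k m : Nat) :
    pvPad k m = (List.range k).map (fun i => if m / 2 ^ (k - 1 - i) % 2 = 1 then '1' else '0') := by
  induction k generalizing m with
  | zero => rfl
  | succ k ih =>
    rw [pvPad, ih, List.range_succ, List.map_append]
    congr 1
    · apply List.map_congr_left
      intro i hi
      have hik : i < k := List.mem_range.1 hi
      have hexp : k + 1 - 1 - i = (k - 1 - i) + 1 := by omega
      have : m / 2 / 2 ^ (k - 1 - i) = m / 2 ^ (k + 1 - 1 - i) := by
        rw [Nat.div_div_eq_div_mul, hexp, pow_succ']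
      rw [this]
    · simp

lemma pvRowSlice (k a b : Nat) (g : Nat → Char) (h : a + b ≤ k) :
    List.take b (List.drop a ((List.range k).map g)) = (List.range b).map (fun j => g (a + j)) := by
  apply List.ext_getElem
  · simp; omega
  · intro i h1 h2
    simp [List.getElem_take, List.getElem_drop]

lemma pvJoin_nil (parts : List (List Char)) : PySem.Chars.join [] parts = parts.flatten := by
  rw [PySem.Chars.join]
  induction parts with
  | nil => rfl
  | cons p ps ih => cases ps <;> simp_all [List.intercalate]

lemma pvPyRange16 : PySem.List.pyRange 0 16 1 = (List.range 16).map (fun i : Nat => (i : Int)) := by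
  rfl

-- A's rendering of the int() of a bit character = the arithmetic cell
lemma pvCellA (m w idx : Nat) :
    (if pvIntBit (pvBitChar m w idx) ≠ 0 then pvBlk else pvShd) = pvCell m w idx := by
  have h0 : pvIntBit '0' = 0 := by decide
  have h1 : pvIntBit '1' = 1 := by decide
  rw [pvBitChar, pvCell]
  by_cases h : m / 2 ^ (w - 1 - idx) % 2 = 1
  · simp [h, h1]
  · simp [h, h0]

-- B's shift-and-mask test = the arithmetic cell, for r, c < 16 and w ≥ 256
lemma pvCellB (m w r c : Nat) (hr : r < 16) (hc : c < 16) (hw : 256 ≤ w) :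
    (if PySem.Int.band ((m : Int) >>> (((w : Nat) : Int) - 1 - 16 * (r : Int) - (c : Int)).toNat) 1 ≠ 0 then pvBlk else pvShd)
      = pvCell m w (16 * r + c) := by
  have he : ((w : Int) - 1 - 16 * (r : Int) - (c : Int)).toNat = w - 1 - (16 * r + c) := by omega
  rw [he]
  have hb : PySem.Int.band ((m : Int) >>> (w - 1 - (16 * r + c) : Nat)) 1
      = ((m / 2 ^ (w - 1 - (16 * r + c)) % 2 : Nat) : Int) := by
    rw [show ((m : Int) >>> (w - 1 - (16 * r + c) : Nat)) = ((m >>> (w - 1 - (16 * r + c)) : Nat) : Int) from rfl,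
      show (1 : Int) = ((1 : Nat) : Int) from rfl, PySem.Int.band_natCast,
      Nat.and_one_is_mod, Nat.shiftRight_eq_div_pow]
  rw [pvCell, hb]
  by_cases h : m / 2 ^ (w - 1 - (16 * r + c)) % 2 = 1
  · rw [if_pos (by simp [h]), if_pos h]
  · have h0 : m / 2 ^ (w - 1 - (16 * r + c)) % 2 = 0 := by omega
    rw [if_neg (by simp [h0]), if_neg h]

lemma pvMain_eq (pattern : String)
    (h1 : (PySem.Int.ofStrBase? pattern 16).isSome = true)
    (h2 : 0 ≤ (PySem.Int.ofStrBase? pattern 16).getD 0) :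
    mask_print_bool pattern = mask_print_bool_alt pattern := by
  obtain ⟨n, hs⟩ := Option.isSome_iff_exists.1 h1
  rw [hs] at h2
  simp only [Option.getD_some] at h2
  set m : Nat := n.toNat with hmdef
  have hnm : n = (m : Int) := (Int.toNat_of_nonneg h2).symm
  rw [mask_print_bool, mask_print_bool_alt, hs]
  simp only [hnm, pvBitLen m]
  set w : Nat := max (pvBinGo m).length 256 with hwdef
  have hw : 256 ≤ w := le_max_right _ _
  -- A's binary_string is the arithmetic bit map of width w
  have hbs : PySem.Chars.zfill (pvBin (m : Int)) 256 =
      (List.range w).map (pvBitChar m w) := by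
    rw [pvZfill_pad m, ← hwdef, pvPad_map]
    apply List.map_congr_left
    intro i hi
    rw [pvBitChar]
  rw [hbs, pvPyRange16]
  simp only [List.map_map]
  -- A's nested foldls → a flatMap over the 16 rows
  simp only [PySem.List.foldl_append_eq_flatMap, List.append_assoc, List.nil_append]
  -- B → a flatMap over the 16 rows
  rw [pvJoin_nil, ← List.flatMap_def, List.flatMap_map]
  congr 1
  apply List.flatMap_congr
  intro i hi
  have hi16 : i < 16 := List.mem_range.1 hi
  simp only [Function.comp_apply]
  -- A's row slice is the arithmetic bit map of row i
  have e1 : ((i : Int) * 16) = ((16 * i : Nat) : Int) := by push_cast; ring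
  have e2 : (((i : Int) + 1) * 16) = ((16 * i + 16 : Nat) : Int) := by push_cast; ring
  rw [e1, e2, PySem.List.slice_natCast]
  have e3 : 16 * i + 16 - 16 * i = 16 := by omega
  rw [e3, pvRowSlice w (16 * i) 16 (pvBitChar m w) (by omega)]
  -- both rows are now built over List.range 16; compare cell by cell
  rw [pvJoin_nil, ← List.flatMap_def, List.map_map, List.flatMap_map]
  congr 1
  apply List.flatMap_congr
  intro j hj
  have hj16 : j < 16 := List.mem_range.1 hj
  simp only [Function.comp_apply]
  exact (pvCellA m w (16 * i + j)).trans (pvCellB m w i j hi16 hj16 hw).symm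

-- ===== VERDICT (by name: the statement is the Claim_ definition above) =====
theorem mask_print_bool_spec : Claim_equal_mask_print_bool := by
  intro pattern _ hpre
  exact pvMain_eq pattern hpre.1 hpre.2
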